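-- pv_equiv track=rewrite | github.com/gerliron18/67101-Introduction-to-Computer-Science | Ex10/ex10.py | path_checker
-- ===== SOURCE A (Python) =====
-- def path_checker(symptoms, path):
--     """
--     This function check if one path is compatible with a list of symptoms.
--     :param symptoms: A list of symptoms
--     :param path: One path of binary tree given as a list of lists
--     :return: True/False according to the compatibility between the symptoms
--              list and the current path
--     """
--     for symptom in path:  # Going trough all the nodes of the path
--         if symptom[1]:  # If the petient have this symptom
--             if symptom[0] in symptoms:
--                 continue
--             else:
--                 return False
--         else:  # If the petient does not have this symptom
--             if not (symptom[0] in symptoms):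
--                 continue
--             else:
--                 return False
--     return True
-- ===== SOURCE B (Python) =====
-- def path_checker(symptoms, path):
--     required_present = {s[0] for s in path if s[1]}
--     required_absent = {s[0] for s in path if not s[1]}
--     sym = set(symptoms)
--     return required_present.issubset(sym) and required_absent.isdisjoint(sym)
-- ===== Notes on version B (the rewrite author's own statement) =====
-- stated objective: idiomatic
-- what changed: Replaces the per-node early-returning scan with two set comprehensions (names required present / required absent) answered by issubset and isdisjoint against the symptom set.
import Mathlib
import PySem

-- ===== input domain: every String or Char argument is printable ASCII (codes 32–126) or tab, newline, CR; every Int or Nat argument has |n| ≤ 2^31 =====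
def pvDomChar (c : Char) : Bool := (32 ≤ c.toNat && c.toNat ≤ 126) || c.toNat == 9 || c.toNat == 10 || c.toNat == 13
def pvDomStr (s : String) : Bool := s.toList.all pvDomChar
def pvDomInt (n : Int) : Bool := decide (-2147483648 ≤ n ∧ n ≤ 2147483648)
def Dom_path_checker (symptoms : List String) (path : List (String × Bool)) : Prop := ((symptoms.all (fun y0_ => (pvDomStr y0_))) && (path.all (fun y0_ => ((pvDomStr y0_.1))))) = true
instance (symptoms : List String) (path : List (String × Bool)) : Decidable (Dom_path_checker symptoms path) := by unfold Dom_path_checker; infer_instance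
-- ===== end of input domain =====

-- B replaces A's per-node early-returning scan by two set comprehensions answered with issubset/isdisjoint (idiomatic decomposition).

-- ===== PORT A =====
def path_checker (symptoms : List String) (path : List (String × Bool)) : Bool :=
  match path with
  | [] => true
  | symptom :: rest =>
    if symptom.2 then
      if symptoms.contains symptom.1 then path_checker symptoms rest else false
    else
      if !(symptoms.contains symptom.1) then path_checker symptoms rest else false

-- ===== PORT B =====
def path_checker_alt (symptoms : List String) (path : List (String × Bool)) : Bool :=
  let required_present : PySem.Set String := PySem.Set.ofList ((path.filter (fun s => s.2)).map (fun s => s.1))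
  let required_absent : PySem.Set String := PySem.Set.ofList ((path.filter (fun s => !s.2)).map (fun s => s.1))
  let sym : PySem.Set String := PySem.Set.ofList symptoms
  PySem.Set.issubset required_present sym && PySem.Set.isdisjoint required_absent sym

-- ===== PRECONDITION & SPEC =====
def Spec_path_checker (symptoms : List String) (path : List (String × Bool)) (out : Bool) : Prop := out = path_checker_alt symptoms path
instance (symptoms : List String) (path : List (String × Bool)) (out : Bool) : Decidable (Spec_path_checker symptoms path out) := by unfold Spec_path_checker; infer_instance

-- ===== CLAIM (what is proved, stated in full; the proofs are below) =====
def Claim_equal_path_checker : Prop := ∀ (symptoms : List String) (path : List (String × Bool)), Dom_path_checker symptoms path → Spec_path_checker symptoms path (path_checker symptoms path)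

-- ===== LEMMAS AND PROOFS =====

lemma path_checker_eq_true_iff (symptoms : List String) (path : List (String × Bool)) :
    path_checker symptoms path = true ↔ ∀ s ∈ path, (s.1 ∈ symptoms ↔ s.2 = true) := by
  induction path with
  | nil => simp [path_checker]
  | cons s rest ih =>
    simp only [path_checker, List.mem_cons]
    by_cases h2 : s.2 <;> by_cases h1 : s.1 ∈ symptoms <;>
      simp [h2, h1, ih]

lemma path_checker_alt_eq_true_iff (symptoms : List String) (path : List (String × Bool)) :
    path_checker_alt symptoms path = true ↔ ∀ s ∈ path, (s.1 ∈ symptoms ↔ s.2 = true) := by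
  simp only [path_checker_alt, Bool.and_eq_true, PySem.Set.issubset_iff,
    PySem.Set.isdisjoint_iff, PySem.Set.mem_ofList, List.mem_map, List.mem_filter]
  constructor
  · rintro ⟨hsub, hdis⟩ s hs
    by_cases h2 : s.2 = true
    · exact ⟨fun _ => h2, fun _ => hsub s.1 ⟨s, ⟨hs, h2⟩, rfl⟩⟩
    · constructor
      · intro hmem
        exact absurd hmem (hdis s.1 ⟨s, ⟨hs, by simp [h2]⟩, rfl⟩)
      · intro h; exact absurd h h2
  · intro h
    constructor
    · rintro x ⟨s, ⟨hs, h2⟩, rfl⟩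
      exact (h s hs).mpr h2
    · rintro x ⟨s, ⟨hs, h2⟩, rfl⟩ hmem
      have := (h s hs).mp hmem
      simp_all

-- ===== VERDICT (by name: the statement is the Claim_ definition above) =====
theorem path_checker_spec : Claim_equal_path_checker := by
  intro symptoms path _
  unfold Spec_path_checker
  rw [Bool.eq_iff_iff, path_checker_eq_true_iff, path_checker_alt_eq_true_iff]
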